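-- pv_equiv track=rewrite | github.com/snguyeen/CS160-Projects | SocialNetworking/social_network.py | number_map_to_sorted_list
-- ===== SOURCE A (Python) =====
-- from operator import itemgetter
--
-- def number_map_to_sorted_list(map_with_number_vals):
--     """Given a dictionary, return a list of the keys in the dictionary.
--     The keys are sorted by the number value they map to, from greatest
--     number down to smallest number.
--     When two keys map to the same number value, the keys are sorted by their
--     natural sort order for whatever type the key is, from least to greatest.
--
--     Arguments:
--         map_with_number_vals: a dictionary whose values are numbers
--
--     Returns: a list of keys, sorted by the values in map_with_number_vals
--     """
--     list = []
--     for key, value in map_with_number_vals.items():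
--         list.append([key, value])
--     list = sorted(list, key=itemgetter(0))
--     list = sorted(list, key=itemgetter(1), reverse=True)
--     final_list = []
--     for val in list:
--         final_list.append(val[0])
--     return final_list
-- ===== SOURCE B (Python) =====
-- def number_map_to_sorted_list(map_with_number_vals):
--     """Group keys by their value: walk the distinct values from greatest to
--     smallest and emit, for each value, its keys in ascending order."""
--     distinct_vals = sorted(set(map_with_number_vals.values()), reverse=True)
--     result = []
--     for v in distinct_vals:
--         result.extend(sorted(k for k, x in map_with_number_vals.items() if x == v))
--     return result
-- ===== Notes on version B (the rewrite author's own statement) =====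
-- stated objective: alternative
-- what changed: Replaces the two chained stable sorts over [key,value] pairs by grouping: sort the distinct values descending, then for each value emit its keys in ascending order (collected by filtering the items).
import Mathlib
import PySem

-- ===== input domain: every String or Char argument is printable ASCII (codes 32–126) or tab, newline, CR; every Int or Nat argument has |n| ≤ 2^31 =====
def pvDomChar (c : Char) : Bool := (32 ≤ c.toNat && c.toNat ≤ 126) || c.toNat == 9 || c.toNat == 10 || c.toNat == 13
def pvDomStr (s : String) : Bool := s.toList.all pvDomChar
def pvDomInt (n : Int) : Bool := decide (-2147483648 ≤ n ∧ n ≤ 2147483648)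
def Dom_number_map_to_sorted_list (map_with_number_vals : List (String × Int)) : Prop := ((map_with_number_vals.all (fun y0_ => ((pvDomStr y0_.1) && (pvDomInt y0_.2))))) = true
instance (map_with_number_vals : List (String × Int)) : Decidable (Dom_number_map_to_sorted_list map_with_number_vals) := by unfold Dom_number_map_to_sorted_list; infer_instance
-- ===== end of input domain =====

-- B groups instead of sorting pairs: distinct values sorted descending, emitting each value's
-- keys in ascending order (objective: alternative decomposition, same observable result).

-- ===== PORT A =====
-- builds [key, value] pairs, sorts by key ascending, re-sorts stably by value descending,
-- then projects the keys
def number_map_to_sorted_list (map_with_number_vals : List (String × Int)) : List String :=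
  let l := map_with_number_vals.foldl (fun acc kv => acc ++ [(kv.1, kv.2)]) []
  let l := PySem.List.sorted l (fun p => p.1) false
  let l := PySem.List.sorted l (fun p => p.2) true
  l.foldl (fun acc p => acc ++ [p.1]) []

-- ===== PORT B =====
-- distinct values sorted descending; for each value, append its keys sorted ascending
def number_map_to_sorted_list_alt (map_with_number_vals : List (String × Int)) : List String :=
  let distinct_vals := PySem.List.sorted (PySem.Set.ofList (map_with_number_vals.map Prod.snd)) (fun v => v) true
  distinct_vals.foldl
    (fun acc v =>
      acc ++ PySem.List.sorted ((map_with_number_vals.filter (fun p => p.2 == v)).map Prod.fst) (fun k => k) false)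
    []

-- ===== PRECONDITION & SPEC =====
def Spec_number_map_to_sorted_list (map_with_number_vals : List (String × Int)) (out : List String) : Prop := out = number_map_to_sorted_list_alt map_with_number_vals
instance (map_with_number_vals : List (String × Int)) (out : List String) : Decidable (Spec_number_map_to_sorted_list map_with_number_vals out) := by unfold Spec_number_map_to_sorted_list; infer_instance

-- ===== CLAIM (what is proved, stated in full; the proofs are below) =====
def Claim_equal_number_map_to_sorted_list : Prop := ∀ (map_with_number_vals : List (String × Int)), Dom_number_map_to_sorted_list map_with_number_vals → Spec_number_map_to_sorted_list map_with_number_vals (number_map_to_sorted_list map_with_number_vals)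

-- ===== LEMMAS AND PROOFS =====

-- the combined order both programs realise: value descending, then key ascending
def pvKey (p : String × Int) : Lex (Int × String) := toLex (-p.2, p.1)

theorem pvKey_inj : Function.Injective pvKey := by
  intro a b h
  unfold pvKey at h
  have h' : ((-a.2, a.1) : Int × String) = (-b.2, b.1) := toLex.injective h
  have h1 : -a.2 = -b.2 := congrArg Prod.fst h'
  have h2 : a.1 = b.1 := congrArg Prod.snd h'
  exact Prod.ext h2 (by omega)

theorem pvKey_le_iff (a b : String × Int) :
    pvKey a ≤ pvKey b ↔ b.2 < a.2 ∨ (a.2 = b.2 ∧ a.1 ≤ b.1) := by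
  unfold pvKey
  rw [Prod.Lex.toLex_le_toLex]
  constructor
  · rintro (h | ⟨h1, h2⟩)
    · exact Or.inl (by omega)
    · exact Or.inr ⟨by omega, h2⟩
  · rintro (h | ⟨h1, h2⟩)
    · exact Or.inl (by omega)
    · exact Or.inr ⟨by omega, h2⟩

-- ---- A side: the chained stable sorts are pairwise ≤ under pvKey ----

theorem insert_stable (x : String × Int) (ys : List (String × Int))
    (hp : ys.Pairwise (fun a b => pvKey a ≤ pvKey b))
    (hle : ∀ y ∈ ys, y.1 ≤ x.1) :
    (PySem.List.insertBy (fun a b => decide (b.2 < a.2)) x ys).Pairwise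
      (fun a b => pvKey a ≤ pvKey b) := by
  induction ys with
  | nil => simp [PySem.List.insertBy]
  | cons y ys ih =>
    rw [PySem.List.insertBy]
    by_cases h : y.2 < x.2
    · simp only [h, decide_true, if_true]
      constructor
      · intro z hz
        rcases List.mem_cons.1 hz with rfl | hz
        · exact (pvKey_le_iff _ _).2 (Or.inl h)
        · have hy := (List.pairwise_cons.1 hp).1
          have := hy z hz
          rcases (pvKey_le_iff _ _).1 this with h' | ⟨h', _⟩
          · exact (pvKey_le_iff _ _).2 (Or.inl (lt_trans h' h))
          · exact (pvKey_le_iff _ _).2 (Or.inl (by omega))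
      · exact hp
    · simp only [h, decide_false]
      obtain ⟨hy, hp'⟩ := List.pairwise_cons.1 hp
      constructor
      · intro z hz
        rcases (PySem.List.insertBy_mem_iff _ _ _ _).1 hz with hz | hz
        · subst hz
          rcases lt_or_eq_of_le (not_lt.1 h) with h' | h'
          · exact (pvKey_le_iff _ _).2 (Or.inl h')
          · exact (pvKey_le_iff _ _).2 (Or.inr ⟨h'.symm, hle y (by simp)⟩)
        · exact hy z hz
      · exact ih hp' (fun z hz => hle z (by simp [hz]))

theorem fold_stable (xs : List (String × Int)) :
    ∀ (acc : List (String × Int)),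
    acc.Pairwise (fun a b => pvKey a ≤ pvKey b) →
    xs.Pairwise (fun a b => a.1 ≤ b.1) →
    (∀ a ∈ acc, ∀ b ∈ xs, a.1 ≤ b.1) →
    (xs.foldl (fun acc x => PySem.List.insertBy (fun a b => decide (b.2 < a.2)) x acc) acc).Pairwise
      (fun a b => pvKey a ≤ pvKey b) := by
  induction xs with
  | nil => intro acc h _ _; simpa using h
  | cons x xs ih =>
    intro acc hacc hxs hcross
    rw [List.foldl_cons]
    obtain ⟨hx, hxs'⟩ := List.pairwise_cons.1 hxs
    apply ih
    · exact insert_stable x acc hacc (fun y hy => hcross y hy x (by simp))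
    · exact hxs'
    · intro a ha b hb
      rcases (PySem.List.insertBy_mem_iff _ _ _ _).1 ha with ha | ha
      · subst ha; exact hx b hb
      · exact hcross a ha b (by simp [hb])

theorem a_pairwise (L : List (String × Int)) :
    (PySem.List.sorted (PySem.List.sorted L (fun p => p.1) false) (fun p => p.2) true).Pairwise
      (fun a b => pvKey a ≤ pvKey b) := by
  rw [PySem.List.sorted_rev_eq_foldl_insertBy]
  exact fold_stable _ [] (by simp)
    (PySem.List.sorted_pairwise L (fun p => p.1)) (by simp)

theorem a_eq (L : List (String × Int)) :
    number_map_to_sorted_list L =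
      (PySem.List.sorted (PySem.List.sorted L (fun p => p.1) false) (fun p => p.2) true).map
        Prod.fst := by
  unfold number_map_to_sorted_list
  simp only [PySem.List.foldl_append_singleton_eq_map, List.nil_append, Prod.mk.eta,
    List.map_id_fun', id]

-- ---- B side: the grouped emission, as a list of (key, value) pairs ----

def pvBlock (L : List (String × Int)) (v : Int) : List (String × Int) :=
  (PySem.List.sorted ((L.filter (fun p => p.2 == v)).map Prod.fst) (fun k => k) false).map
    (fun k => (k, v))

def pvVals (L : List (String × Int)) : List Int :=
  PySem.List.sorted (PySem.Set.ofList (L.map Prod.snd)) (fun v => v) true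

def pvP (L : List (String × Int)) : List (String × Int) :=
  (pvVals L).flatMap (pvBlock L)

theorem b_eq (L : List (String × Int)) :
    number_map_to_sorted_list_alt L = (pvP L).map Prod.fst := by
  unfold number_map_to_sorted_list_alt pvP pvBlock pvVals
  rw [PySem.List.foldl_append_eq_flatMap, List.map_flatMap]
  simp [Function.comp_def]

theorem block_perm (L : List (String × Int)) (v : Int) :
    (pvBlock L v).Perm (L.filter (fun p => p.2 == v)) := by
  unfold pvBlock
  have h1 := (PySem.List.sorted_perm ((L.filter (fun p => p.2 == v)).map Prod.fst) (fun k => k) false)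
  refine ((h1.map (fun k => (k, v))).trans ?_).symm.symm
  rw [List.map_map]
  have : ∀ p ∈ L.filter (fun p => p.2 == v), ((fun k => (k, v)) ∘ Prod.fst) p = id p := by
    intro p hp
    have := (List.mem_filter.1 hp).2
    simp only [beq_iff_eq] at this
    simp [Function.comp, ← this]
  rw [List.map_congr_left this, List.map_id]

theorem flatMap_perm_congr {α β : Type} (vs : List α) (f g : α → List β)
    (h : ∀ v ∈ vs, (f v).Perm (g v)) : (vs.flatMap f).Perm (vs.flatMap g) := by
  induction vs with
  | nil => simp
  | cons v vs ih =>
    simp only [List.flatMap_cons]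
    exact (h v (by simp)).append (ih (fun u hu => h u (by simp [hu])))

theorem partition_perm : ∀ (vs : List Int) (M : List (String × Int)), vs.Nodup →
    (∀ p ∈ M, p.2 ∈ vs) →
    (vs.flatMap (fun v => M.filter (fun p => p.2 == v))).Perm M := by
  intro vs
  induction vs with
  | nil =>
    intro M _ hcov
    cases M with
    | nil => simp
    | cons p M => exact absurd (hcov p (by simp)) (by simp)
  | cons v vs ih =>
    intro M hnd hcov
    rw [List.flatMap_cons]
    have hre : ∀ v' ∈ vs, M.filter (fun p => p.2 == v') =
        (M.filter (fun p => !(p.2 == v))).filter (fun p => p.2 == v') := by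
      intro v' hv'
      rw [List.filter_filter]
      apply List.filter_congr
      intro p _
      by_cases h : p.2 = v'
      · have hne : v' ≠ v := by
          rintro rfl; exact (List.nodup_cons.1 hnd).1 hv'
        simp [h, hne]
      · simp [h]
    have hfl : vs.flatMap (fun v' => M.filter (fun p => p.2 == v')) =
        vs.flatMap (fun v' => (M.filter (fun p => !(p.2 == v))).filter (fun p => p.2 == v')) := by
      apply List.flatMap_congr  -- pointwise equal functions on members
      intro v' hv'
      exact hre v' hv'
    rw [hfl]
    have hperm := ih (M.filter (fun p => !(p.2 == v))) (List.nodup_cons.1 hnd).2 ?_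
    · exact (List.Perm.append_left _ hperm).trans (List.filter_append_perm _ M)
    · intro p hp
      rcases List.mem_filter.1 hp with ⟨hpM, hpv⟩
      have := hcov p hpM
      simp only [List.mem_cons] at this
      rcases this with h | h
      · simp [h] at hpv
      · exact h

theorem pvP_perm (L : List (String × Int)) : (pvP L).Perm L := by
  unfold pvP
  have h1 : ∀ v ∈ pvVals L, (pvBlock L v).Perm (L.filter (fun p => p.2 == v)) :=
    fun v _ => block_perm L v
  refine (flatMap_perm_congr _ _ _ h1).trans ?_
  apply partition_perm
  · unfold pvVals
    exact ((PySem.List.sorted_perm _ _ _).nodup_iff).2 (PySem.Set.nodup_ofList _)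
  · intro p hp
    unfold pvVals
    rw [PySem.List.mem_sorted, PySem.Set.mem_ofList]
    exact List.mem_map.2 ⟨p, hp, rfl⟩

theorem vals_pairwise (L : List (String × Int)) :
    (pvVals L).Pairwise (fun u v => v < u) := by
  unfold pvVals
  have h1 := PySem.List.sorted_pairwise_rev (PySem.Set.ofList (L.map Prod.snd)) (fun v => v)
  have h2 : (PySem.List.sorted (PySem.Set.ofList (L.map Prod.snd)) (fun v => v) true).Nodup :=
    ((PySem.List.sorted_perm _ _ _).nodup_iff).2 (PySem.Set.nodup_ofList _)
  have := h1.and h2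
  exact this.imp (fun {a b} h => lt_of_le_of_ne h.1 (fun he => h.2 he.symm))

theorem flatMap_pairwise (vs : List Int) (f : Int → List (String × Int))
    (hval : ∀ v, ∀ p ∈ f v, p.2 = v)
    (hblk : ∀ v, (f v).Pairwise (fun a b => pvKey a ≤ pvKey b))
    (hvs : vs.Pairwise (fun u v => v < u)) :
    (vs.flatMap f).Pairwise (fun a b => pvKey a ≤ pvKey b) := by
  induction vs with
  | nil => simp
  | cons v vs ih =>
    rw [List.flatMap_cons, List.pairwise_append]
    refine ⟨hblk v, ih hvs.of_cons, ?_⟩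
    intro a ha b hb
    rcases List.mem_flatMap.1 hb with ⟨v', hv', hbv'⟩
    have h1 : a.2 = v := hval v a ha
    have h2 : b.2 = v' := hval v' b hbv'
    have h3 : v' < v := (List.pairwise_cons.1 hvs).1 v' hv'
    exact (pvKey_le_iff a b).2 (Or.inl (by omega))

theorem pvP_pairwise (L : List (String × Int)) :
    (pvP L).Pairwise (fun a b => pvKey a ≤ pvKey b) := by
  unfold pvP
  apply flatMap_pairwise
  · intro v p hp
    rcases List.mem_map.1 hp with ⟨k, _, rfl⟩
    rfl
  · intro v
    unfold pvBlock
    rw [List.pairwise_map]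
    have := PySem.List.sorted_pairwise ((L.filter (fun p => p.2 == v)).map Prod.fst) (fun k => k)
    exact this.imp (fun {a b} h => (pvKey_le_iff (a, v) (b, v)).2 (Or.inr ⟨rfl, h⟩))
  · exact vals_pairwise L

-- ===== VERDICT (by name: the statement is the Claim_ definition above) =====
theorem number_map_to_sorted_list_spec : Claim_equal_number_map_to_sorted_list := by
  intro L _
  unfold Spec_number_map_to_sorted_list
  rw [a_eq, b_eq]
  congr 1
  apply PySem.List.eq_of_perm_of_pairwise_le_of_injective pvKey pvKey_inj
  · exact ((PySem.List.sorted_perm _ _ _).trans (PySem.List.sorted_perm _ _ _)).trans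
      (pvP_perm L).symm
  · exact a_pairwise L
  · exact pvP_pairwise L
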